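-- pv_equiv track=rewrite | github.com/pipachiesa/foostats-ai | event_detector/pass_detector.py | _build_possession_segments
-- ===== SOURCE A (Python) =====
-- def _build_possession_segments(possession_per_frame):
--     """
--     Group consecutive frames where the same player has the ball.
--
--     Returns list of dicts:
--     {
--         "player_id": int,
--         "team": int,
--         "frame_start": int,
--         "frame_end": int,   # inclusive
--         "length": int
--     }
--     """
--     segments = []
--     current_player = None
--     current_team = None
--     start_frame = None
--     last_possession_frame = None  # track actual last frame with possession
--
--     for frame_num, poss in enumerate(possession_per_frame):
--         if poss is not None:
--             player_id, team = poss
--             if player_id == current_player: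
--                 last_possession_frame = frame_num  # extend
--             else:
--                 # close previous segment using actual last possession frame
--                 if current_player is not None and last_possession_frame is not None:
--                     segments.append({
--                         'player_id': current_player,
--                         'team': current_team,
--                         'frame_start': start_frame,
--                         'frame_end': last_possession_frame,  # actual last frame
--                         'length': last_possession_frame - start_frame + 1,
--                     })
--                 current_player = player_id
--                 current_team = team
--                 start_frame = frame_num
--                 last_possession_frame = frame_num
--
--     # close last segment
--     if current_player is not None and last_possession_frame is not None:
--         segments.append({
--             'player_id': current_player,
--             'team': current_team,
--             'frame_start': start_frame,
--             'frame_end': last_possession_frame,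
--             'length': last_possession_frame - start_frame + 1,
--         })
--
--     return segments
-- ===== SOURCE B (Python) =====
-- def _build_possession_segments(possession_per_frame):
--     # Stage 1: keep only frames with possession, tagged with their frame index.
--     frames = [(i, p[0], p[1]) for i, p in enumerate(possession_per_frame) if p is not None]
--     # Stage 2: two-pointer run grouping — find each maximal run of the same
--     # player in `frames` up front, then emit the whole segment at once.
--     segments = []
--     n = len(frames)
--     k = 0
--     while k < n:
--         j = k
--         while j + 1 < n and frames[j + 1][1] == frames[k][1]:
--             j += 1
--         i0, pid, team = frames[k]
--         i1 = frames[j][0]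
--         segments.append({
--             'player_id': pid,
--             'team': team,
--             'frame_start': i0,
--             'frame_end': i1,
--             'length': i1 - i0 + 1,
--         })
--         k = j + 1
--     return segments
-- ===== Notes on version B (the rewrite author's own statement) =====
-- stated objective: alternative
-- what changed: Replaced A's incremental sentinel-variable state machine (which carries an open segment across the scan and closes it on player change / at the end) by a staged algorithm: first filter the possession frames with their indices, then a two-pointer pass that locates each maximal same-player run up front and emits the whole segment at once.
import Mathlib
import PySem

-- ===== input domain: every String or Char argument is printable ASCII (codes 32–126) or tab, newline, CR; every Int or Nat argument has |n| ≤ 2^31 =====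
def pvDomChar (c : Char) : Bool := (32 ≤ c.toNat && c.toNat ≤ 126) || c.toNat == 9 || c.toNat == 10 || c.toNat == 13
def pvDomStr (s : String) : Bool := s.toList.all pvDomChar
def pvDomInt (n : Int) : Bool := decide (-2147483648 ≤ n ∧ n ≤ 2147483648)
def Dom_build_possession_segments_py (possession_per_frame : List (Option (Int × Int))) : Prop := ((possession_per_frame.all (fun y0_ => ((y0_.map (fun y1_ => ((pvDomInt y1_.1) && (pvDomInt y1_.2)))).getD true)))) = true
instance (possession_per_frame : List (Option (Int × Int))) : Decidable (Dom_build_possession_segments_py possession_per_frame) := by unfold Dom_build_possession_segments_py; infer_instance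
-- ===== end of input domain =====

-- B replaces A's incremental sentinel-variable state machine by a staged algorithm:
-- filter the possession frames with their indices, then locate each maximal
-- same-player run up front and emit the whole segment at once (objective: alternative).

-- ===== PORT A =====
-- the segment dict literal A appends (insertion order of its keys)
def pvSegA (p t s e : Int) : List (String × Int) :=
  [("player_id", p), ("team", t), ("frame_start", s), ("frame_end", e), ("length", e - s + 1)]

-- the for-loop over enumerate(possession_per_frame), state = (segments, current_player, current_team, start_frame, last_possession_frame)
def pvLoopA (l : List (Option (Int × Int))) (frame_num : Int)
    (segments : List (List (String × Int)))
    (cp ct sf lpf : Option Int) : List (List (String × Int)) :=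
  match l with
  | [] =>
      -- close last segment
      match cp, lpf with
      | some p, some e => segments ++ [pvSegA p (ct.getD 0) (sf.getD 0) e]
      | _, _ => segments
  | none :: rest => pvLoopA rest (frame_num + 1) segments cp ct sf lpf
  | some (player_id, team) :: rest =>
      if some player_id == cp then
        pvLoopA rest (frame_num + 1) segments cp ct sf (some frame_num)
      else
        let segments' :=
          match cp, lpf with
          | some p, some e => segments ++ [pvSegA p (ct.getD 0) (sf.getD 0) e]
          | _, _ => segments
        pvLoopA rest (frame_num + 1) segments' (some player_id) (some team) (some frame_num) (some frame_num)

def build_possession_segments_py (possession_per_frame : List (Option (Int × Int))) : List (List (String × Int)) :=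
  pvLoopA possession_per_frame 0 [] none none none none

-- ===== PORT B =====
-- stage 1: [(i, p[0], p[1]) for i, p in enumerate(...) if p is not None]
def pvFramesB (l : List (Option (Int × Int))) (i : Int) : List (Int × Int × Int) :=
  match l with
  | [] => []
  | none :: rest => pvFramesB rest (i + 1)
  | some (pid, team) :: rest => (i, pid, team) :: pvFramesB rest (i + 1)

-- frame index of the last element of a run (default: the run's head index)
def pvLastIdx : List (Int × Int × Int) → Int → Int
  | [], e => e
  | f :: rest, _ => pvLastIdx rest f.1

-- the segment dict B appends (same key order as the Python dict literal)
def pvSegB (p t s e : Int) : List (String × Int) :=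
  [("player_id", p), ("team", t), ("frame_start", s), ("frame_end", e), ("length", e - s + 1)]

-- stage 2: the outer while-loop; the inner two-pointer run search j = end of the
-- maximal run of frames[k]'s player is rendered as takeWhile/dropWhile on the tail,
-- which is exact for that index scan
def pvGroupB (frames : List (Int × Int × Int)) : List (List (String × Int)) :=
  match frames with
  | [] => []
  | (i, pid, team) :: rest =>
      let run := rest.takeWhile (fun f => f.2.1 == pid)
      pvSegB pid team i (pvLastIdx run i) ::
        pvGroupB (rest.dropWhile (fun f => f.2.1 == pid))
termination_by frames.length
decreasing_by
  simp only [List.length_cons]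
  exact Nat.lt_succ_of_le (List.length_dropWhile_le _ _)

def build_possession_segments_py_alt (possession_per_frame : List (Option (Int × Int))) : List (List (String × Int)) :=
  pvGroupB (pvFramesB possession_per_frame 0)

-- ===== PRECONDITION & SPEC =====
def Spec_build_possession_segments_py (possession_per_frame : List (Option (Int × Int))) (out : List (List (String × Int))) : Prop := out = build_possession_segments_py_alt possession_per_frame
instance (possession_per_frame : List (Option (Int × Int))) (out : List (List (String × Int))) : Decidable (Spec_build_possession_segments_py possession_per_frame out) := by unfold Spec_build_possession_segments_py; infer_instance

-- ===== CLAIM (what is proved, stated in full; the proofs are below) =====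
def Claim_equal_build_possession_segments_py : Prop := ∀ (possession_per_frame : List (Option (Int × Int))), Dom_build_possession_segments_py possession_per_frame → Spec_build_possession_segments_py possession_per_frame (build_possession_segments_py possession_per_frame)

-- ===== LEMMAS AND PROOFS =====

-- A's loop restricted to the possession frames, with an open segment (p,t,s,e)
def pvRunsA : List (Int × Int × Int) → Int → Int → Int → Int → List (List (String × Int))
  | [], p, t, s, e => [pvSegA p t s e]
  | (i, pid, team) :: rest, p, t, s, e =>
      if pid = p then pvRunsA rest p t s i
      else pvSegA p t s e :: pvRunsA rest pid team i i

lemma pvLoopA_open (l : List (Option (Int × Int))) :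
    ∀ (frame : Int) (segments : List (List (String × Int))) (p t s e : Int),
      pvLoopA l frame segments (some p) (some t) (some s) (some e)
        = segments ++ pvRunsA (pvFramesB l frame) p t s e := by
  induction l with
  | nil => intro frame segments p t s e; simp [pvLoopA, pvFramesB, pvRunsA]
  | cons hd rest ih =>
    intro frame segments p t s e
    match hd with
    | none => simpa [pvLoopA, pvFramesB] using ih (frame + 1) segments p t s e
    | some (pid, team) =>
      by_cases h : pid = p
      · subst h
        simp only [pvLoopA, pvFramesB, pvRunsA, beq_self_eq_true, if_true]
        exact ih (frame + 1) segments pid t s frame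
      · have hb : (some pid == some p) = false := by simp [h]
        simp only [pvLoopA, pvFramesB, pvRunsA, hb, Bool.false_eq_true, if_false, if_neg h,
          Option.getD_some]
        rw [ih (frame + 1) (segments ++ [pvSegA p t s e]) pid team frame frame,
          List.append_assoc]
        rfl

lemma pvLoopA_closed (l : List (Option (Int × Int))) :
    ∀ (frame : Int),
      pvLoopA l frame [] none none none none
        = match pvFramesB l frame with
          | [] => []
          | (i, pid, team) :: r => pvRunsA r pid team i i := by
  induction l with
  | nil => intro frame; simp [pvLoopA, pvFramesB]
  | cons hd rest ih =>
    intro frame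
    match hd with
    | none => simpa [pvLoopA, pvFramesB] using ih (frame + 1)
    | some (pid, team) =>
      simp only [pvLoopA, pvFramesB, Option.some_beq_none, Bool.false_eq_true, if_false]
      simpa using pvLoopA_open rest (frame + 1) [] pid team frame frame

lemma pvRunsA_eq_group (fs : List (Int × Int × Int)) :
    ∀ (p t s e : Int),
      pvRunsA fs p t s e
        = pvSegB p t s (pvLastIdx (fs.takeWhile (fun f => f.2.1 == p)) e)
            :: pvGroupB (fs.dropWhile (fun f => f.2.1 == p)) := by
  induction fs with
  | nil => intro p t s e; simp [pvRunsA, pvGroupB, pvLastIdx, pvSegA, pvSegB]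
  | cons hd rest ih =>
    intro p t s e
    obtain ⟨i, pid, team⟩ := hd
    by_cases h : pid = p
    · subst h
      simp only [pvRunsA, if_true, List.takeWhile_cons, List.dropWhile_cons, beq_self_eq_true,
        if_true]
      simpa [pvLastIdx] using ih pid t s i
    · have hb : (pid == p) = false := by simp [h]
      simp only [pvRunsA, if_neg h, List.takeWhile_cons, List.dropWhile_cons, hb,
        Bool.false_eq_true, if_false]
      rw [ih pid team i i]
      simp [pvGroupB, pvLastIdx, pvSegA, pvSegB]

-- ===== VERDICT (by name: the statement is the Claim_ definition above) =====
theorem build_possession_segments_py_spec : Claim_equal_build_possession_segments_py := by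
  intro l _
  unfold Spec_build_possession_segments_py build_possession_segments_py build_possession_segments_py_alt
  rw [pvLoopA_closed l 0]
  cases hf : pvFramesB l 0 with
  | nil => simp [pvGroupB]
  | cons hd r =>
    obtain ⟨i, pid, team⟩ := hd
    show pvRunsA r pid team i i = _
    rw [pvRunsA_eq_group r pid team i i, pvGroupB]
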